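-- pv_equiv track=rewrite | github.com/drelliotlee/03-ML-refresher | 07-vectorizing-functions.py | complex_python_func
-- ===== SOURCE A (Python) =====
-- POSITIVE = {"great", "amazing"}
--
-- NEGATIVE = {"bad", "terrible"}
--
-- def complex_python_func(s: str) -> int:
--     score = 0
--     for token in s.lower().split():
--         if token in POSITIVE:
--             score += 1
--         elif token in NEGATIVE:
--             score -= 1
--     return score
-- ===== SOURCE B (Python) =====
-- from collections import Counter
--
-- POSITIVE = {"great", "amazing"}
--
-- NEGATIVE = {"bad", "terrible"}
--
-- def complex_python_func(s: str) -> int: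
--     counts = Counter(s.lower().split())
--     return sum(counts[w] for w in POSITIVE) - sum(counts[w] for w in NEGATIVE)
-- ===== Notes on version B (the rewrite author's own statement) =====
-- stated objective: idiomatic
-- what changed: B builds a Counter of the tokens once and then iterates over the fixed sentiment vocabularies, looking up each keyword's frequency, instead of A's token-by-token membership scan with a running score.
import Mathlib
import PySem

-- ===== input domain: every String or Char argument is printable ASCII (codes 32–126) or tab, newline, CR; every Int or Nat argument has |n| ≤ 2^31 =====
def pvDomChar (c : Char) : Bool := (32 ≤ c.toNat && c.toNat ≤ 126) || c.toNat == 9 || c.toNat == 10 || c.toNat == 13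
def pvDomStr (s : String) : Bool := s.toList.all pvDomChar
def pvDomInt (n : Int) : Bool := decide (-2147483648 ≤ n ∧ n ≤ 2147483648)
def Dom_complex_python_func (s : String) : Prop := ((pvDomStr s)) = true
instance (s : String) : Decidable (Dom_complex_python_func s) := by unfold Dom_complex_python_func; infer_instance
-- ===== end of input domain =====

-- ===== PORT A =====
-- B tabulates token frequencies once and sums keyword counts instead of A's token scan (same return value).
def pvPOSITIVE : List String := ["great", "amazing"]
def pvNEGATIVE : List String := ["bad", "terrible"]

def complex_python_func (s : String) : Int :=
  (PySem.Str.split₀ (PySem.Str.lower s)).foldl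
    (fun score token =>
      if token ∈ pvPOSITIVE then score + 1
      else if token ∈ pvNEGATIVE then score - 1
      else score) 0

-- ===== PORT B =====
def complex_python_func_alt (s : String) : Int :=
  let counts := PySem.Dict.counter (PySem.Str.split₀ (PySem.Str.lower s))
  (pvPOSITIVE.map (fun w => counts.getD w 0)).sum
    - (pvNEGATIVE.map (fun w => counts.getD w 0)).sum

-- ===== PRECONDITION & SPEC =====
def Spec_complex_python_func (s : String) (out : Int) : Prop := out = complex_python_func_alt s
instance (s : String) (out : Int) : Decidable (Spec_complex_python_func s out) := by unfold Spec_complex_python_func; infer_instance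

-- ===== CLAIM (what is proved, stated in full; the proofs are below) =====
def Claim_equal_complex_python_func : Prop := ∀ (s : String), Dom_complex_python_func s → Spec_complex_python_func s (complex_python_func s)

-- ===== LEMMAS AND PROOFS =====
theorem pv_fold_eq (l : List String) (a : Int) :
    l.foldl
      (fun score token =>
        if token ∈ pvPOSITIVE then score + 1
        else if token ∈ pvNEGATIVE then score - 1
        else score) a
    = a + (l.count "great" : Int) + (l.count "amazing" : Int)
        - (l.count "bad" : Int) - (l.count "terrible" : Int) := by
  induction l generalizing a with
  | nil => simp
  | cons x xs ih =>
    simp only [List.foldl_cons, ih, List.count_cons]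
    by_cases h1 : x = "great" <;> by_cases h2 : x = "amazing" <;>
      by_cases h3 : x = "bad" <;> by_cases h4 : x = "terrible" <;>
      simp_all [pvPOSITIVE, pvNEGATIVE] <;> ring

-- ===== VERDICT (by name: the statement is the Claim_ definition above) =====
theorem complex_python_func_spec : Claim_equal_complex_python_func := by
  intro s _
  unfold Spec_complex_python_func complex_python_func complex_python_func_alt
  generalize PySem.Str.split₀ (PySem.Str.lower s) = l
  rw [pv_fold_eq]
  simp only [pvPOSITIVE, pvNEGATIVE, List.map_cons, List.map_nil, List.sum_cons,
    List.sum_nil, PySem.Dict.getD_counter]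
  ring
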